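-- pv_equiv track=rewrite | github.com/Di-Ca-N/chess | pieces/rook.py | trajectory
-- ===== SOURCE A (Python) =====
-- def trajectory(from_position, to_position):
--     from_row, from_col = from_position
--     to_row, to_col = to_position
--
--     if from_row == to_row:
--         if from_col > to_col:
--             from_col, to_col = to_col, from_col
--         return {(from_row, x) for x in range(from_col, to_col + 1)}
--
--     elif from_col == to_col:
--         if from_row > to_row:
--             from_row, to_row = to_row, from_row
--         return {(x, from_col) for x in range(from_row, to_row + 1)}
--
--     else:
--         return set()
-- ===== SOURCE B (Python) =====
-- def trajectory(from_position, to_position):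
--     from_row, from_col = from_position
--     to_row, to_col = to_position
--     if from_row != to_row and from_col != to_col:
--         return set()
--     r, c = min(from_row, to_row), min(from_col, to_col)
--     end_r, end_c = max(from_row, to_row), max(from_col, to_col)
--     dr = 1 if end_r > r else 0
--     dc = 1 if end_c > c else 0
--     squares = set()
--     while True:
--         squares.add((r, c))
--         if (r, c) == (end_r, end_c):
--             break
--         r, c = r + dr, c + dc
--     return squares
-- ===== Notes on version B (the rewrite author's own statement) =====
-- stated objective: alternative
-- what changed: Replaced the two axis-specific branch comprehensions with endpoint swaps by a single direction-vector walk: one loop steps by (dr,dc)=(sign of each axis span) from the componentwise-min square to the componentwise-max square, covering row, column and equal-endpoint cases uniformly.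
import Mathlib
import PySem

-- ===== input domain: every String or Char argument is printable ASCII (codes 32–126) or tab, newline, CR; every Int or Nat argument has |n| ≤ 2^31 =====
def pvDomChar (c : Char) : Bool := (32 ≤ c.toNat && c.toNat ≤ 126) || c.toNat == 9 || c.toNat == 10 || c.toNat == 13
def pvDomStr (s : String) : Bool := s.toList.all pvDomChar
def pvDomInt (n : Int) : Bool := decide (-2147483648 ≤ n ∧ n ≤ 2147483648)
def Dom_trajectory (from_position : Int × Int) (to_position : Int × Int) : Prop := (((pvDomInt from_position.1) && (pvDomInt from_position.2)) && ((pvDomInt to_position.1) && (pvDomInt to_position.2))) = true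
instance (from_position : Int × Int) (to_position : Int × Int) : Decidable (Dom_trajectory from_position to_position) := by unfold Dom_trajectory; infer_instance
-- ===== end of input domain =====

-- B replaces A's two axis-specific range comprehensions (with endpoint swaps) by one
-- direction-vector walk from the componentwise-min square to the componentwise-max square
-- (objective: alternative decomposition, same cost).

-- ===== PORT A =====
def trajectory (from_position : Int × Int) (to_position : Int × Int) : List (Int × Int) :=
  let from_row := from_position.1
  let from_col := from_position.2
  let to_row := to_position.1
  let to_col := to_position.2
  if from_row = to_row then
    -- if from_col > to_col: swap
    let p := if from_col > to_col then (to_col, from_col) else (from_col, to_col)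
    PySem.Set.ofList ((PySem.List.pyRange p.1 (p.2 + 1) 1).map (fun x => (from_row, x)))
  else if from_col = to_col then
    let p := if from_row > to_row then (to_row, from_row) else (from_row, to_row)
    PySem.Set.ofList ((PySem.List.pyRange p.1 (p.2 + 1) 1).map (fun x => (x, from_col)))
  else
    PySem.Set.empty

-- ===== PORT B =====
-- the 'while True' loop of Source B; the fuel is the number of remaining steps to the end
-- square ((end_r - r) + (end_c - c), one summand being 0), which is exactly when the
-- Python loop breaks, so the transcription is exact.
def trajWalk (r c end_r end_c dr dc : Int) (fuel : Nat) (acc : PySem.Set (Int × Int)) :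
    PySem.Set (Int × Int) :=
  match fuel with
  | 0 => PySem.Set.add acc (r, c)
  | n + 1 => trajWalk (r + dr) (c + dc) end_r end_c dr dc n (PySem.Set.add acc (r, c))

def trajectory_alt (from_position : Int × Int) (to_position : Int × Int) : List (Int × Int) :=
  let from_row := from_position.1
  let from_col := from_position.2
  let to_row := to_position.1
  let to_col := to_position.2
  if from_row ≠ to_row ∧ from_col ≠ to_col then
    PySem.Set.empty
  else
    let r := min from_row to_row
    let c := min from_col to_col
    let end_r := max from_row to_row
    let end_c := max from_col to_col
    let dr : Int := if end_r > r then 1 else 0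
    let dc : Int := if end_c > c then 1 else 0
    trajWalk r c end_r end_c dr dc ((end_r - r) + (end_c - c)).toNat PySem.Set.empty

-- ===== PRECONDITION & SPEC =====
def Spec_trajectory (from_position : Int × Int) (to_position : Int × Int) (out : List (Int × Int)) : Prop := out = trajectory_alt from_position to_position
instance (from_position : Int × Int) (to_position : Int × Int) (out : List (Int × Int)) : Decidable (Spec_trajectory from_position to_position out) := by unfold Spec_trajectory; infer_instance

-- ===== CLAIM (what is proved, stated in full; the proofs are below) =====
def Claim_equal_trajectory : Prop := ∀ (from_position : Int × Int) (to_position : Int × Int), Dom_trajectory from_position to_position → Spec_trajectory from_position to_position (trajectory from_position to_position)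

-- ===== LEMMAS AND PROOFS =====

-- the horizontal walk adds exactly the squares (r, c), …, (r, c + fuel), in range order
lemma trajWalk_row (r : Int) : ∀ (fuel : Nat) (c : Int) (acc : PySem.Set (Int × Int)),
    trajWalk r c r (c + fuel) 0 1 fuel acc
      = ((PySem.List.pyRange c (c + fuel + 1) 1).map (fun x => (r, x))).foldl PySem.Set.add acc := by
  intro fuel
  induction fuel with
  | zero =>
      intro c acc
      rw [PySem.List.pyRange_one_cons (by omega)]
      simp [trajWalk]
  | succ n ih =>
      intro c acc
      have hstep : trajWalk r c r (c + (n + 1 : Nat)) 0 1 (n + 1) acc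
          = trajWalk r (c + 1) r ((c + 1) + (n : Nat)) 0 1 n (PySem.Set.add acc (r, c)) := by
        show trajWalk (r + 0) (c + 1) r (c + (n + 1 : Nat)) 0 1 n (PySem.Set.add acc (r, c)) = _
        have : c + ((n : Int) + 1) = (c + 1) + (n : Nat) := by push_cast; ring
        rw [show ((n + 1 : Nat) : Int) = (n : Int) + 1 from by push_cast; ring, this]
        simp
      rw [hstep, ih (c + 1) (PySem.Set.add acc (r, c)),
        PySem.List.pyRange_one_cons (show c < c + (n + 1 : Nat) + 1 by push_cast; omega)]
      have : c + (n + 1 : Nat) + 1 = (c + 1) + (n : Nat) + 1 := by push_cast; ring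
      rw [this]
      simp

-- the vertical walk, symmetrically
lemma trajWalk_col (c : Int) : ∀ (fuel : Nat) (r : Int) (acc : PySem.Set (Int × Int)),
    trajWalk r c (r + fuel) c 1 0 fuel acc
      = ((PySem.List.pyRange r (r + fuel + 1) 1).map (fun x => (x, c))).foldl PySem.Set.add acc := by
  intro fuel
  induction fuel with
  | zero =>
      intro r acc
      rw [PySem.List.pyRange_one_cons (by omega)]
      simp [trajWalk]
  | succ n ih =>
      intro r acc
      have hstep : trajWalk r c (r + (n + 1 : Nat)) c 1 0 (n + 1) acc
          = trajWalk (r + 1) c ((r + 1) + (n : Nat)) c 1 0 n (PySem.Set.add acc (r, c)) := by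
        show trajWalk (r + 1) (c + 0) (r + (n + 1 : Nat)) c 1 0 n (PySem.Set.add acc (r, c)) = _
        have : r + ((n : Int) + 1) = (r + 1) + (n : Nat) := by push_cast; ring
        rw [show ((n + 1 : Nat) : Int) = (n : Int) + 1 from by push_cast; ring, this]
        simp
      rw [hstep, ih (r + 1) (PySem.Set.add acc (r, c)),
        PySem.List.pyRange_one_cons (show r < r + (n + 1 : Nat) + 1 by push_cast; omega)]
      have : r + (n + 1 : Nat) + 1 = (r + 1) + (n : Nat) + 1 := by push_cast; ring
      rw [this]
      simp

lemma ofList_foldl {α : Type} [BEq α] (l : List α) :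
    PySem.Set.ofList l = l.foldl PySem.Set.add PySem.Set.empty := by
  rfl

lemma pyRange_single (a : Int) : PySem.List.pyRange a (a + 1) 1 = [a] := by
  rw [PySem.List.pyRange_one_cons (by omega)]
  simp [PySem.List.pyRange_one]

-- A's row branch equals B's walk along the row
lemma row_eq (fr lo hi : Int) (h : lo ≤ hi) :
    PySem.Set.ofList ((PySem.List.pyRange lo (hi + 1) 1).map (fun x => (fr, x)))
      = trajWalk fr lo fr hi 0 (if hi > lo then 1 else 0) (hi - lo).toNat PySem.Set.empty := by
  by_cases he : lo = hi
  · subst he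
    simp only [sub_self, Int.toNat_zero, gt_iff_lt, lt_self_iff_false, if_false,
      pyRange_single, List.map_cons, List.map_nil]
    rfl
  · have h1 : hi > lo := by omega
    rw [if_pos h1]
    have hend : lo + (((hi - lo).toNat : Nat) : Int) = hi := by omega
    have hw := trajWalk_row fr ((hi - lo).toNat) lo PySem.Set.empty
    rw [hend] at hw
    rw [hw, ofList_foldl]

-- A's column branch equals B's walk along the column
lemma col_eq (fc lo hi : Int) (h : lo ≤ hi) :
    PySem.Set.ofList ((PySem.List.pyRange lo (hi + 1) 1).map (fun x => (x, fc)))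
      = trajWalk lo fc hi fc (if hi > lo then 1 else 0) 0 (hi - lo).toNat PySem.Set.empty := by
  by_cases he : lo = hi
  · subst he
    simp only [sub_self, Int.toNat_zero, gt_iff_lt, lt_self_iff_false, if_false,
      pyRange_single, List.map_cons, List.map_nil]
    rfl
  · have h1 : hi > lo := by omega
    rw [if_pos h1]
    have hend : lo + (((hi - lo).toNat : Nat) : Int) = hi := by omega
    have hw := trajWalk_col fc ((hi - lo).toNat) lo PySem.Set.empty
    rw [hend] at hw
    rw [hw, ofList_foldl]

-- ===== VERDICT (by name: the statement is the Claim_ definition above) =====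
theorem trajectory_spec : Claim_equal_trajectory := by
  intro fp tp _
  obtain ⟨fr, fc⟩ := fp
  obtain ⟨tr, tc⟩ := tp
  show trajectory (fr, fc) (tr, tc) = trajectory_alt (fr, fc) (tr, tc)
  unfold trajectory trajectory_alt
  by_cases hr : fr = tr
  · subst hr
    have hguard : ¬ (fr ≠ fr ∧ fc ≠ tc) := by simp
    have hA : (if fc > tc then (tc, fc) else (fc, tc)) = (min fc tc, max fc tc) := by
      split_ifs with h <;> simp [Prod.ext_iff] <;> omega
    simp only [if_neg hguard, hA, min_self, max_self, sub_self, zero_add,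
      gt_iff_lt, lt_self_iff_false, if_false]
    exact row_eq fr (min fc tc) (max fc tc) (by omega)
  · by_cases hc : fc = tc
    · subst hc
      have hguard : ¬ (fr ≠ tr ∧ fc ≠ fc) := by simp
      have hA : (if fr > tr then (tr, fr) else (fr, tr)) = (min fr tr, max fr tr) := by
        split_ifs with h <;> simp [Prod.ext_iff] <;> omega
      simp only [if_neg hr, if_neg hguard, hA, min_self, max_self, sub_self,
        add_zero, gt_iff_lt, lt_self_iff_false, if_false]
      exact col_eq fc (min fr tr) (max fr tr) (by omega)
    · have hguard : (fr ≠ tr ∧ fc ≠ tc) := ⟨hr, hc⟩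
      simp only [if_neg hr, if_neg hc, if_pos hguard]
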